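-- pv_equiv track=rewrite | github.com/first0506/Algorithm-Problem-Solving | [3차] 자동완성_김현준.py | solution
-- ===== SOURCE A (Python) =====
-- def solution(words):
--     answer = 0
--     words.sort()    # 단어들 사전 순으로 정렬
--     for i in range(len(words)):
--         word = words[i] # word = 현재 탐색하는 단어
--         p, n = False, False # p = word 왼쪽 단어 조건 충족 여부, n = word 오른쪽 단어 조건 충족 여부
--         if i!=0:    # word가 첫번째 단어가 아니면
--             pre = words[i-1]    # pre = word 왼쪽 단어
--         else:
--             p = True    # 첫번쨰 단어면 왼쪽 단어 비교 안해도 되므로 True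
--         if i!=len(words)-1: # word가 마지막 단어가 아니면
--             next = words[i+1]   # next = word 오른쪽 단어
--         else:
--             n = True    # 마지막 단어면 오른쪽 단어 비교 안해도 되므로 True
--         for k in range(len(word)):  # 앞에서부터 한 철자씩 비교    (몇 번째 글자인지 -> 최소 k를 찾아야한다)
--             if not p and len(pre) <= k: # k가 pre단어 길이보다 길 때 비교 안해도 되므로 True
--                 p = True
--             if not n and len(next) <= k:
--                 n = True
--             if not p:
--                 if pre[k]!=word[k]: # pre와 철자가 달라졌다면
--                     p = True
--             if not n:
--                 if next[k]!=word[k]:    # next와 철자가 달라졌다면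
--                     n = True
--             if p and n: # 왼쪽, 오른쪽 모두 비교 완료되면
--                 break
--         answer += k+1   # 인덱스 0부터 시작이므로 +1
--     return answer
--
-- words = ['go','gone','guild'] # 7
-- ===== SOURCE B (Python) =====
-- def solution(words):
--     words.sort()  # keep A's in-place sort (observable side effect)
--     # count, for every nonempty prefix, how many words start with it
--     prefixes = [w[:k + 1] for w in words for k in range(len(w))]
--     cnt = {}
--     for p in prefixes:
--         cnt[p] = cnt.get(p, 0) + 1
--     total = 0
--     for w in words:
--         for k in range(len(w)):
--             if cnt[w[:k + 1]] == 1: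
--                 total += k + 1
--                 break
--         else:
--             total += len(w)
--     return total
-- ===== Notes on version B (the rewrite author's own statement) =====
-- stated objective: alternative
-- what changed: A sorts and, per word, runs a stateful character loop with two boolean flags comparing against both sorted neighbours; B instead builds a dict counting how many words start with each prefix and, per word, takes the first prefix whose count is 1 (or the full word), summing those lengths; B keeps A's in-place sort of the argument.
-- outside the precondition, e.g. on solution(['', 'a']): A raises UnboundLocalError, B returns 1
-- crash fix: A raises UnboundLocalError on any list containing the empty string (it sorts first and the inner loop never binds k); B returns the total with the empty word contributing 0 characters. — e.g. on solution(["", "a"]): A raises UnboundLocalError, B returns 1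
import Mathlib
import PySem

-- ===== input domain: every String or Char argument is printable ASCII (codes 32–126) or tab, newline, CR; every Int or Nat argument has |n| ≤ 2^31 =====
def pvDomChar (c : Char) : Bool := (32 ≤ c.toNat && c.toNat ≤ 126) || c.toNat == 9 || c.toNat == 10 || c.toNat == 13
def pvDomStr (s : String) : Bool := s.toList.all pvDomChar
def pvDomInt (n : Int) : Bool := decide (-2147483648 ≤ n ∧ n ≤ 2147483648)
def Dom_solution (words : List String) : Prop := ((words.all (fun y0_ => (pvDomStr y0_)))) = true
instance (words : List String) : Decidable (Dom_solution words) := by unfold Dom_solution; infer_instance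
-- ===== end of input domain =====

-- B replaces A's per-word neighbour scan (after the sort) by a dict counting every prefix
-- of every word; objective: alternative decomposition, same asymptotic cost.
-- Both A and B sort `words` in place (Python side); the theorems are about the return value.

-- ===== PORT A =====
-- words.sort(): Python string comparison is lexicographic on code points, i.e. the
-- lexicographic order on toList; sorting with key toList is that exact order.
-- inner `for k in range(len(word))` loop with flags p, n and break; returns the final k.
-- On an empty word Python's k would be unbound (UnboundLocalError, excluded by Pre_);
-- there this port returns 0 - 1 = 0 (Nat), a don't-care outside Pre_.
def pvInnerA (pre nxt word : List Char) : Bool → Bool → Nat → Nat → Nat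
  | _, _, 0, k => k - 1
  | p, n, fuel + 1, k =>
    let p := p || decide (pre.length ≤ k)
    let n := n || decide (nxt.length ≤ k)
    let p := p || decide (pre.getD k default ≠ word.getD k default)
    let n := n || decide (nxt.getD k default ≠ word.getD k default)
    if p && n then k else pvInnerA pre nxt word p n fuel (k + 1)

def solution (words : List String) : Int :=
  let ws := PySem.List.sorted words (fun x => x.toList) false
  (List.range ws.length).foldl
    (fun answer i =>
      let word := (ws.getD i default).toList
      let p := decide (i = 0)
      let pre := (ws.getD (i - 1) default).toList
      let n := decide (i = ws.length - 1)
      let nxt := (ws.getD (i + 1) default).toList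
      answer + ((pvInnerA pre nxt word p n word.length 0 : Int) + 1)) 0

-- ===== PORT B =====
-- prefixes of one word: [w[:k+1] for k in range(len(w))]
def pvPrefixes (w : List Char) : List (List Char) :=
  (List.range w.length).map (fun k => w.take (k + 1))

-- inner `for k in range(len(w)): … break / else:` loop of B
def pvBCost (cnt : PySem.Dict (List Char) Int) (w : List Char) : Nat → Nat → Int
  | 0, _ => (w.length : Int)
  | fuel + 1, k =>
    if cnt.getD (w.take (k + 1)) 0 == 1 then ((k : Int) + 1) else pvBCost cnt w fuel (k + 1)

def solution_alt (words : List String) : Int :=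
  let ws := PySem.List.sorted words (fun x => x.toList) false
  let prefixes := ws.flatMap (fun w => pvPrefixes w.toList)
  let cnt := prefixes.foldl (fun d p => d.insert p (d.getD p 0 + 1)) PySem.Dict.empty
  ws.foldl (fun total w => total + pvBCost cnt w.toList w.toList.length 0) 0

-- ===== PRECONDITION & SPEC =====
-- Pre_ excludes lists containing the empty string: the empty string sorts first and A's
-- inner loop then never runs, so A raises UnboundLocalError (k unbound) — A returns on
-- exactly the lists without "".
def Pre_solution (words : List String) : Prop := "" ∉ words
instance (words : List String) : Decidable (Pre_solution words) := by unfold Pre_solution; infer_instance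
def pvWitness_solution : List String := (["go", "gone", "guild"])

-- A raises UnboundLocalError on any list containing the empty string; B returns the
-- autocomplete total with the empty word contributing 0 characters (theorem solution_raises).
def Raises_solution (words : List String) : Prop := "" ∈ words
instance (words : List String) : Decidable (Raises_solution words) := by unfold Raises_solution; infer_instance
def pvRaiseWitness_solution : List String := (["", "a"])
def pvRaiseWitnessOut_solution : Int := 1

def Spec_solution (words : List String) (out : Int) : Prop := out = solution_alt words
instance (words : List String) (out : Int) : Decidable (Spec_solution words out) := by unfold Spec_solution; infer_instance

-- ===== CLAIM (what is proved, stated in full; the proofs are below) =====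
def Claim_equal_solution : Prop := ∀ (words : List String), Dom_solution words → Pre_solution words → Spec_solution words (solution words)
def Claim_raises_solution : Prop := (∀ (words : List String), Dom_solution words → Raises_solution words → ¬ Pre_solution words) ∧ (Dom_solution (pvRaiseWitness_solution) ∧ Raises_solution (pvRaiseWitness_solution) ∧ solution_alt (pvRaiseWitness_solution) = pvRaiseWitnessOut_solution)

-- ===== LEMMAS AND PROOFS =====

def pvLcp : List Char → List Char → Nat
  | x :: xs, y :: ys => if x = y then pvLcp xs ys + 1 else 0
  | _, _ => 0

lemma pvLcp_comm (a b : List Char) : pvLcp a b = pvLcp b a := by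
  induction a generalizing b with
  | nil => cases b <;> simp [pvLcp]
  | cons x xs ih => cases b with
    | nil => simp [pvLcp]
    | cons y ys => by_cases h : x = y <;> simp [pvLcp, h, ih, eq_comm]

lemma pvTake_prefix_iff (a b : List Char) (j : Nat) (hj : j ≤ a.length) :
    a.take j <+: b ↔ j ≤ pvLcp a b := by
  induction j generalizing a b with
  | zero => simp
  | succ j ih =>
    cases a with
    | nil => simp at hj
    | cons x xs =>
      cases b with
      | nil => simp [pvLcp]
      | cons y ys =>
        by_cases h : x = y
        · subst h
          simp only [List.take_succ_cons, List.cons_prefix_cons, pvLcp]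
          constructor
          · rintro ⟨-, hp⟩; exact Nat.succ_le_succ ((ih xs ys (Nat.le_of_succ_le_succ hj)).1 hp)
          · intro hle; exact ⟨trivial, (ih xs ys (Nat.le_of_succ_le_succ hj)).2 (Nat.le_of_succ_le_succ hle)⟩
        · simp [pvLcp, h, List.cons_prefix_cons]

lemma pvLcp_step (a b : List Char) (k : Nat) (hk : k < b.length) :
    pvLcp a b ≤ k ↔ (pvLcp a b < k ∨ a.length ≤ k ∨ a.getD k default ≠ b.getD k default) := by
  induction k generalizing a b with
  | zero =>
    cases b with
    | nil => simp at hk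
    | cons y ys =>
      cases a with
      | nil => simp [pvLcp]
      | cons x xs => by_cases h : x = y <;> simp [pvLcp, h]
  | succ k ih =>
    cases b with
    | nil => simp at hk
    | cons y ys =>
      cases a with
      | nil => simp [pvLcp]
      | cons x xs =>
        by_cases h : x = y
        · have := ih xs ys (Nat.lt_of_succ_lt_succ hk)
          simp only [pvLcp, if_pos h, List.length_cons, List.getD_cons_succ]
          rw [show pvLcp xs ys + 1 ≤ k + 1 ↔ pvLcp xs ys ≤ k by omega,
              show pvLcp xs ys + 1 < k + 1 ↔ pvLcp xs ys < k by omega,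
              show xs.length + 1 ≤ k + 1 ↔ xs.length ≤ k by omega]
          exact this
        · rw [show pvLcp (x :: xs) (y :: ys) = 0 from by simp [pvLcp, h]]
          simp

lemma pvList_le_cons {x y : Char} {a b : List Char} (hab : (x :: a) ≤ (y :: b)) :
    x < y ∨ (x = y ∧ a ≤ b) := by
  rcases lt_trichotomy x y with h | h | h
  · exact Or.inl h
  · subst h
    refine Or.inr ⟨rfl, ?_⟩
    rw [← Std.not_lt] at hab ⊢
    intro hba; exact hab (List.cons_lt_cons_iff.mpr (Or.inr ⟨rfl, hba⟩))
  · exfalso; rw [← Std.not_lt] at hab; exact hab (List.cons_lt_cons_iff.mpr (Or.inl h))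

lemma pvLcp_mono_of_le (a b c : List Char) (hab : a ≤ b) (hbc : b ≤ c) :
    pvLcp a c ≤ pvLcp b c ∧ pvLcp a c ≤ pvLcp a b := by
  induction a generalizing b c with
  | nil => cases c <;> simp [pvLcp]
  | cons x xs ih =>
    cases c with
    | nil => simp [pvLcp]
    | cons z zs =>
      by_cases hxz : x = z
      · subst hxz
        cases b with
        | nil =>
          exfalso; rw [← Std.not_lt] at hab; exact hab (List.nil_lt_cons _ _)
        | cons y ys =>
          rcases pvList_le_cons hab with h | ⟨h, hab'⟩
          · rcases pvList_le_cons hbc with h2 | ⟨h2, _⟩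
            · exact absurd (h.trans h2) (lt_irrefl x)
            · exact absurd (h2 ▸ h) (lt_irrefl x)
          · subst h
            rcases pvList_le_cons hbc with h2 | ⟨h2, hbc'⟩
            · exact absurd h2 (lt_irrefl x)
            · have := ih ys zs hab' hbc'
              simp [pvLcp, this.1, this.2]
      · simp [pvLcp, hxz]

lemma pvFlag {P Q R S : Prop} [Decidable P] [Decidable Q] [Decidable R] [Decidable S]
    (h : P ↔ Q ∨ R ∨ S) : (decide Q || decide R || decide S) = decide P := by
  by_cases q : Q <;> by_cases r : R <;> by_cases s : S <;> simp [q, r, s, h]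

lemma pvInnerA_inv (pre nxt word : List Char) (p₀ n₀ : Bool) (hL : 0 < word.length)
    (K : Nat)
    (hK : K = min (word.length - 1)
      (max (if p₀ then 0 else pvLcp pre word) (if n₀ then 0 else pvLcp nxt word))) :
    ∀ fuel k, fuel + k = word.length → k ≤ K →
      pvInnerA pre nxt word (p₀ || decide (pvLcp pre word < k))
        (n₀ || decide (pvLcp nxt word < k)) fuel k = K := by
  set sp := if p₀ then 0 else pvLcp pre word with hsp
  set sn := if n₀ then 0 else pvLcp nxt word with hsn
  intro fuel
  induction fuel with
  | zero => intro k hfk hkK; exfalso; omega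
  | succ fuel ih =>
    intro k hfk hkK
    have hkL : k < word.length := by omega
    have hp : ((p₀ || decide (pvLcp pre word < k)) || decide (pre.length ≤ k)
        || decide (pre.getD k default ≠ word.getD k default)) = decide (sp ≤ k) := by
      cases p₀ with
      | true => simp [hsp]
      | false =>
        rw [Bool.false_or, hsp, if_neg Bool.false_ne_true]
        exact pvFlag ((pvLcp_step pre word k hkL).trans (by tauto))
    have hn : ((n₀ || decide (pvLcp nxt word < k)) || decide (nxt.length ≤ k)
        || decide (nxt.getD k default ≠ word.getD k default)) = decide (sn ≤ k) := by
      cases n₀ with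
      | true => simp [hsn]
      | false =>
        rw [Bool.false_or, hsn, if_neg Bool.false_ne_true]
        exact pvFlag ((pvLcp_step nxt word k hkL).trans (by tauto))
    show pvInnerA pre nxt word _ _ (fuel + 1) k = K
    simp only [pvInnerA]
    rw [hp, hn]
    by_cases hbreak : max sp sn ≤ k
    · have h1 : decide (sp ≤ k) = true := decide_eq_true (le_trans (le_max_left _ _) hbreak)
      have h2 : decide (sn ≤ k) = true := decide_eq_true (le_trans (le_max_right _ _) hbreak)
      rw [if_pos (by rw [h1, h2]; rfl)]
      omega
    · rw [if_neg (by
        intro hc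
        have := Bool.and_eq_true_iff.mp hc
        exact hbreak (max_le (of_decide_eq_true this.1) (of_decide_eq_true this.2)))]
      by_cases hk1 : k + 1 ≤ K
      · have e1 : decide (sp ≤ k) = (p₀ || decide (pvLcp pre word < k + 1)) := by
          cases p₀ with
          | true => simp [hsp]
          | false => simp [hsp]
        have e2 : decide (sn ≤ k) = (n₀ || decide (pvLcp nxt word < k + 1)) := by
          cases n₀ with
          | true => simp [hsn]
          | false => simp [hsn]
        rw [e1, e2]
        exact ih (k + 1) (by omega) hk1
      · have hf0 : fuel = 0 := by omega
        subst hf0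
        rw [pvInnerA]
        omega

lemma pvInnerA_eq (pre nxt word : List Char) (p₀ n₀ : Bool) (hL : 0 < word.length) :
    pvInnerA pre nxt word p₀ n₀ word.length 0 =
      min (word.length - 1)
        (max (if p₀ then 0 else pvLcp pre word) (if n₀ then 0 else pvLcp nxt word)) := by
  have := pvInnerA_inv pre nxt word p₀ n₀ hL _ rfl word.length 0 (by omega) (by omega)
  simpa using this

-- count of a nonempty q among the prefixes of w
lemma pvCount_prefixes (w q : List Char) (hq : q ≠ []) :
    (pvPrefixes w).count q = if q <+: w then 1 else 0 := by
  unfold pvPrefixes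
  rw [List.count_eq_countP, List.countP_map]
  by_cases h : q <+: w
  · have hlen : q.length ≤ w.length := h.length_le
    have hpos : 0 < q.length := List.length_pos_of_ne_nil hq
    have : List.countP ((fun x => x == q) ∘ fun k => w.take (k + 1)) (List.range w.length)
        = List.countP (fun k => k == q.length - 1) (List.range w.length) := by
      apply List.countP_congr
      intro k hk
      rw [List.mem_range] at hk
      simp only [Function.comp_apply, beq_iff_eq]
      constructor
      · intro he
        have : (w.take (k + 1)).length = q.length := by rw [he]
        rw [List.length_take] at this
        omega
      · intro he
        have hk1 : k + 1 = q.length := by omega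
        rw [hk1, ← List.prefix_iff_eq_take.mp h]
    rw [this]
    rw [show List.countP (fun k => k == q.length - 1) (List.range w.length)
        = List.count (q.length - 1) (List.range w.length) from (List.count_eq_countP).symm]
    rw [List.count_range, if_pos h, if_pos (by omega)]
  · rw [if_neg h]
    rw [List.countP_eq_zero]
    intro k hk
    simp only [Function.comp_apply, beq_iff_eq]
    intro he
    exact h (he ▸ List.take_prefix _ _)

-- countP over range equals 1 iff the known witness is the only one
lemma pvCountP_range_one_iff (n i : Nat) (Q : Nat → Bool) (hi : i < n) (hQ : Q i = true) :
    (List.countP Q (List.range n) = 1 ↔ ∀ j, j < n → j ≠ i → Q j = false) := by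
  constructor
  · intro h1 j hj hne
    by_contra hb
    have hQj : Q j = true := by revert hb; cases Q j <;> simp
    have hmemi : i ∈ (List.range n).filter Q := by
      rw [List.mem_filter, List.mem_range]; exact ⟨hi, hQ⟩
    have hmemj : j ∈ (List.range n).filter Q := by
      rw [List.mem_filter, List.mem_range]; exact ⟨hj, hQj⟩
    rw [List.countP_eq_length_filter] at h1
    rcases List.length_eq_one_iff.mp h1 with ⟨a, ha⟩
    rw [ha, List.mem_singleton] at hmemi hmemj
    exact hne (hmemj.trans hmemi.symm)
  · intro h
    have : List.countP Q (List.range n) = List.countP (fun j => j == i) (List.range n) := by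
      apply List.countP_congr
      intro j hj
      rw [List.mem_range] at hj
      simp only [beq_iff_eq]
      constructor
      · intro hqj
        by_contra hne
        rw [h j hj hne] at hqj; exact Bool.false_ne_true hqj
      · intro he; exact he ▸ hQ
    rw [this]
    rw [show List.countP (fun j => j == i) (List.range n) = List.count i (List.range n) from
      (List.count_eq_countP).symm]
    rw [List.count_range, if_pos hi]

lemma pvCnt_getD (ws : List String) (q : List Char) (hq : q ≠ []) :
    ((ws.flatMap (fun w => pvPrefixes w.toList)).foldl
        (fun d p => d.insert p (d.getD p 0 + 1)) PySem.Dict.empty).getD q 0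
      = (ws.countP (fun v => decide (q <+: v.toList)) : Int) := by
  rw [PySem.Dict.foldl_insert_getD_add_one_eq_counter, PySem.Dict.getD_counter,
    List.count_flatMap]
  have : ws.map (List.count q ∘ fun w => pvPrefixes w.toList)
      = ws.map (fun v => if decide (q <+: v.toList) = true then 1 else 0) := by
    apply List.map_congr_left
    intro v _
    simp only [Function.comp_apply, pvCount_prefixes v.toList q hq]
    by_cases h : q <+: v.toList <;> simp [h]
  rw [this, PySem.List.sum_map_ite_one_zero_nat]

lemma pvBCost_eq (cnt : PySem.Dict (List Char) Int) (w : List Char) (N : Nat)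
    (h : ∀ j, 1 ≤ j → j ≤ w.length → (cnt.getD (w.take j) 0 = 1 ↔ N < j)) :
    ∀ fuel k, fuel + k = w.length → k ≤ N →
      pvBCost cnt w fuel k = (min w.length (N + 1) : Int) := by
  intro fuel
  induction fuel with
  | zero =>
    intro k hfk hkN
    show (w.length : Int) = _
    rw [min_eq_left (by omega)]
  | succ fuel ih =>
    intro k hfk hkN
    show (if cnt.getD (w.take (k + 1)) 0 == 1 then ((k : Int) + 1) else pvBCost cnt w fuel (k + 1)) = _
    have hiff := h (k + 1) (by omega) (by omega)
    by_cases hN : N ≤ k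
    · rw [if_pos (beq_iff_eq.mpr (hiff.mpr (by omega)))]
      have hkN' : k = N := by omega
      subst hkN'
      rw [min_eq_right (by omega)]
    · rw [if_neg (by
        intro hc
        exact hN (by have := hiff.mp (beq_iff_eq.mp hc); omega))]
      exact ih (k + 1) (by omega) (by omega)

def pvWAt (ws : List String) (i : Nat) : List Char := (ws.getD i default).toList
def pvNmax (ws : List String) (i : Nat) : Nat :=
  (((List.range ws.length).filter (fun j => j ≠ i)).map
      (fun j => pvLcp (pvWAt ws j) (pvWAt ws i))).foldr max 0

lemma pvLe_foldr_max (l : List Nat) (x : Nat) (hx : x ∈ l) : x ≤ l.foldr max 0 := by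
  induction l with
  | nil => cases hx
  | cons y ys ih =>
    rcases List.mem_cons.mp hx with h | h
    · subst h; exact le_max_left _ _
    · exact le_trans (ih h) (le_max_right _ _)

lemma pvFoldr_max_le_iff (l : List Nat) (m : Nat) :
    l.foldr max 0 ≤ m ↔ ∀ x ∈ l, x ≤ m := by
  induction l with
  | nil => simp
  | cons y ys ih => simp [ih]

lemma pvNmax_lt_iff (ws : List String) (i t : Nat) (ht : 0 < t) :
    pvNmax ws i < t ↔ ∀ j, j < ws.length → j ≠ i → pvLcp (pvWAt ws j) (pvWAt ws i) < t := by
  unfold pvNmax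
  rw [Nat.lt_iff_add_one_le, show t = (t - 1) + 1 by omega, Nat.add_le_add_iff_right,
    pvFoldr_max_le_iff]
  constructor
  · intro h j hj hne
    have := h _ (List.mem_map_of_mem (by
      rw [List.mem_filter, List.mem_range]; exact ⟨hj, by simpa using hne⟩))
    omega
  · intro h x hx
    rcases List.mem_map.mp hx with ⟨j, hj, rfl⟩
    rw [List.mem_filter, List.mem_range] at hj
    have := h j hj.1 (by simpa using hj.2)
    omega

lemma pvNmax_eq_neighbors (ws : List String)
    (hsort : ∀ p q : Nat, p ≤ q → q < ws.length → pvWAt ws p ≤ pvWAt ws q)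
    (i : Nat) (hi : i < ws.length) :
    max (if i = 0 then 0 else pvLcp (pvWAt ws (i - 1)) (pvWAt ws i))
      (if i = ws.length - 1 then 0 else pvLcp (pvWAt ws (i + 1)) (pvWAt ws i))
      = pvNmax ws i := by
  apply le_antisymm
  · apply max_le
    · by_cases h0 : i = 0
      · simp [h0]
      · rw [if_neg h0]
        apply pvLe_foldr_max
        apply List.mem_map_of_mem
        rw [List.mem_filter, List.mem_range]
        exact ⟨by omega, by simp; omega⟩
    · by_cases hl : i = ws.length - 1
      · simp [hl]
      · rw [if_neg hl]
        apply pvLe_foldr_max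
        apply List.mem_map_of_mem
        rw [List.mem_filter, List.mem_range]
        exact ⟨by omega, by simp⟩
  · rw [pvNmax, pvFoldr_max_le_iff]
    intro x hx
    rcases List.mem_map.mp hx with ⟨j, hj, rfl⟩
    rw [List.mem_filter, List.mem_range] at hj
    have hjn := hj.1
    have hne : j ≠ i := by simpa using hj.2
    rcases Nat.lt_or_ge j i with hji | hij
    · have h0 : i ≠ 0 := by omega
      rw [if_neg h0]
      refine le_trans ?_ (le_max_left _ _)
      exact (pvLcp_mono_of_le _ _ _ (hsort j (i - 1) (by omega) (by omega))
        (hsort (i - 1) i (by omega) hi)).1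
    · have hij' : i + 1 ≤ j := by omega
      have hl : i ≠ ws.length - 1 := by omega
      rw [if_neg hl]
      refine le_trans ?_ (le_max_right _ _)
      rw [pvLcp_comm, pvLcp_comm (pvWAt ws (i + 1))]
      exact (pvLcp_mono_of_le _ _ _ (hsort i (i + 1) (by omega) (by omega))
        (hsort (i + 1) j hij' hjn)).2


lemma pvMap_getD {β : Type} (ws : List String) (f : String → β) :
    ws.map f = (List.range ws.length).map (fun i => f (ws.getD i default)) := by
  apply List.ext_getElem
  · simp
  · intro i h1 h2
    simp only [List.getElem_map, List.getElem_range, List.getD_eq_getElem?_getD]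
    rw [List.getElem?_eq_getElem (by simpa using h1)]
    rfl

-- ===== VERDICT (by name: the statement is the Claim_ definition above) =====
lemma pvMain (words : List String) (hpre : Pre_solution words) :
    solution words = solution_alt words := by
  unfold solution solution_alt
  set ws := PySem.List.sorted words (fun x => x.toList) false with hws
  have hmem : ∀ s ∈ ws, s ≠ "" := by
    intro s hs e
    exact hpre (e ▸ ((PySem.List.mem_sorted _ _ _ _).mp hs))
  have hgetD : ∀ i, i < ws.length → ws.getD i default ∈ ws := by
    intro i hi
    rw [List.getD_eq_getElem?_getD, List.getElem?_eq_getElem hi]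
    exact List.getElem_mem hi
  have hlen : ∀ i, i < ws.length → 0 < (pvWAt ws i).length := by
    intro i hi
    have := hmem _ (hgetD i hi)
    unfold pvWAt
    apply List.length_pos_of_ne_nil
    intro hnil
    exact this (String.toList_eq_nil_iff.mp hnil)
  have hpair : ws.Pairwise (fun a b => a.toList ≤ b.toList) := by
    have hinst : (fun (a b : List Char) => a.decidableLT b)
        = (LinearOrder.toDecidableLT : DecidableLT (List Char)) := by
      funext a b; exact Subsingleton.elim _ _
    rw [hws, hinst]
    exact PySem.List.sorted_pairwise words _
  have hsort : ∀ p q : Nat, p ≤ q → q < ws.length → pvWAt ws p ≤ pvWAt ws q := by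
    intro p q hpq hq
    rcases Nat.eq_or_lt_of_le hpq with h | h
    · subst h; exact le_refl _
    · have := List.pairwise_iff_getElem.mp hpair p q (by omega) hq h
      unfold pvWAt
      rw [List.getD_eq_getElem?_getD, List.getElem?_eq_getElem (by omega),
        List.getD_eq_getElem?_getD, List.getElem?_eq_getElem hq]
      exact this
  simp only [PySem.List.foldl_add]
  congr 1
  rw [pvMap_getD ws (fun w => pvBCost _ w.toList w.toList.length 0)]
  congr 1
  apply List.map_congr_left
  intro i hi
  rw [List.mem_range] at hi
  show (↑(pvInnerA (pvWAt ws (i - 1)) (pvWAt ws (i + 1)) (pvWAt ws i)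
      (decide (i = 0)) (decide (i = ws.length - 1)) (pvWAt ws i).length 0) + 1 : Int)
    = pvBCost _ (pvWAt ws i) (pvWAt ws i).length 0
  rw [pvInnerA_eq _ _ _ _ _ (hlen i hi)]
  have hwseq : ws = (List.range ws.length).map (fun k => ws.getD k default) := by
    simpa using pvMap_getD ws (fun x => x)
  have hB : pvBCost ((ws.flatMap (fun w => pvPrefixes w.toList)).foldl
        (fun d p => d.insert p (d.getD p 0 + 1)) PySem.Dict.empty)
      (pvWAt ws i) ((pvWAt ws i).length) 0
      = min ((pvWAt ws i).length : Int) ((pvNmax ws i : Int) + 1) := by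
    apply pvBCost_eq _ _ (pvNmax ws i) ?_ _ 0 (by omega) (by omega)
    intro j hj1 hjL
    have hqne : (pvWAt ws i).take j ≠ [] := by
      apply List.ne_nil_of_length_pos
      rw [List.length_take]
      have := hlen i hi
      omega
    rw [pvCnt_getD ws _ hqne]
    rw [show (((ws.countP (fun v => decide ((pvWAt ws i).take j <+: v.toList)) : Nat) : Int) = 1
        ↔ ws.countP (fun v => decide ((pvWAt ws i).take j <+: v.toList)) = 1) from by
      exact_mod_cast Iff.rfl]
    have hc : ∀ q : List Char, ws.countP (fun v => decide (q <+: v.toList))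
        = List.countP (fun k => decide (q <+: pvWAt ws k)) (List.range ws.length) := by
      intro q
      conv_lhs => rw [hwseq]
      rw [List.countP_map]
      rfl
    rw [hc]
    rw [pvCountP_range_one_iff ws.length i _ hi
      (decide_eq_true (List.take_prefix j (pvWAt ws i)))]
    rw [pvNmax_lt_iff ws i j (by omega)]
    apply forall_congr'
    intro j'
    apply imp_congr_right
    intro hj'
    apply imp_congr_right
    intro hne
    constructor
    · intro hfalse
      have hnp : ¬ ((pvWAt ws i).take j <+: pvWAt ws j') := by
        intro hp
        rw [decide_eq_true hp] at hfalse
        simp at hfalse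
      rw [pvTake_prefix_iff _ _ j hjL] at hnp
      rw [pvLcp_comm]
      omega
    · intro hlt
      apply decide_eq_false
      rw [pvTake_prefix_iff _ _ j hjL]
      rw [pvLcp_comm] at hlt
      omega
  rw [hB]
  simp only [decide_eq_true_eq]
  rw [pvNmax_eq_neighbors ws hsort i hi]
  have hL := hlen i hi
  push_cast
  omega

-- ===== VERDICT (by name: the statement is the Claim_ definition above) =====
theorem solution_spec : Claim_equal_solution := by
  intro words _ hpre
  unfold Spec_solution
  exact pvMain words hpre

theorem solution_raises : Claim_raises_solution := by
  unfold Claim_raises_solution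
  exact ⟨fun w _ h hp => hp h, by decide⟩

-- self-check: the recorded crash-witness output is indeed B's value at the witness
theorem pvRaiseWitness_ok : solution_alt pvRaiseWitness_solution = pvRaiseWitnessOut_solution :=
  solution_raises.2.2.2
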